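-- pv_equiv track=rewrite | github.com/pasindudiloshan/Hirenext.ai | app/utils/skill_library.py | _flatten_skills
-- ===== SOURCE A (Python) =====
-- def _flatten_skills(skill_dict: dict) -> list:
--     """Flatten categorized dictionary into unique sorted list."""
--     skills = []
--     for category in skill_dict.values():
--         skills.extend(category)
--
--     # Remove duplicates while preserving order
--     seen = set()
--     unique_skills = []
--     for skill in skills:
--         if skill not in seen:
--             unique_skills.append(skill)
--             seen.add(skill)
--
--     return sorted(unique_skills)
-- ===== SOURCE B (Python) =====
-- def _flatten_skills(skill_dict: dict) -> list:
--     """Flatten categorized dictionary into unique sorted list."""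
--     srt = sorted(s for cat in skill_dict.values() for s in cat)
--     out = []
--     for s in srt:
--         if not out or out[-1] != s:
--             out.append(s)
--     return out
-- ===== Notes on version B (the rewrite author's own statement) =====
-- stated objective: idiomatic
-- what changed: Replaces the set-based first-occurrence dedup followed by a sort with sort-then-adjacent-dedup: sort the flattened list once, then one pass keeping each element only when it differs from the last one kept, with no auxiliary set.
import Mathlib
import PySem

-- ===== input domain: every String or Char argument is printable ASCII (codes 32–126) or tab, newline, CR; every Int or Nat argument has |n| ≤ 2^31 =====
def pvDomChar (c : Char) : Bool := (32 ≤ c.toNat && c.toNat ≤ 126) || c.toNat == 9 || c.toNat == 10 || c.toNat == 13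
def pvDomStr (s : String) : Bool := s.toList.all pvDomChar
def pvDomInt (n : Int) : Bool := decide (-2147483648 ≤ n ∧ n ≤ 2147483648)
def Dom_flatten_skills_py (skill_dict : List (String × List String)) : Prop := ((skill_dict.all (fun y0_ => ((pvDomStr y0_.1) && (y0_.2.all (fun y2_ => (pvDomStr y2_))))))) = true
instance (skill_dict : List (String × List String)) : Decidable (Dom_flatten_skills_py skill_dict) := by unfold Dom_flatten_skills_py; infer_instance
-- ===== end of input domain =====

-- B replaces A's set-based first-occurrence dedup followed by a sort with sort-then-adjacent-dedup (no set); same result, proved equal.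


-- ===== PORT A =====
def flatten_skills_py (skill_dict : List (String × List String)) : List String :=
  -- skills = []; for category in skill_dict.values(): skills.extend(category)
  let skills := skill_dict.foldl (fun acc kv => acc ++ kv.2) []
  -- seen = set(); unique_skills = []; for skill in skills: if skill not in seen: append; add
  let st := skills.foldl
    (fun (st : PySem.Set String × List String) skill =>
      if ¬ PySem.Set.contains st.1 skill then (PySem.Set.add st.1 skill, st.2 ++ [skill]) else st)
    (PySem.Set.empty, [])
  PySem.List.sorted st.2 (fun x => x) false

-- ===== PORT B =====
def flatten_skills_py_alt (skill_dict : List (String × List String)) : List String :=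
  -- srt = sorted(s for cat in skill_dict.values() for s in cat)
  let srt := PySem.List.sorted (skill_dict.flatMap (fun kv => kv.2)) (fun x => x) false
  -- out = []; for s in srt: if not out or out[-1] != s: out.append(s)
  srt.foldl (fun out s => if out.getLast? ≠ some s then out ++ [s] else out) []

-- ===== PRECONDITION & SPEC =====
def Spec_flatten_skills_py (skill_dict : List (String × List String)) (out : List String) : Prop := out = flatten_skills_py_alt skill_dict
instance (skill_dict : List (String × List String)) (out : List String) : Decidable (Spec_flatten_skills_py skill_dict out) := by unfold Spec_flatten_skills_py; infer_instance

-- ===== CLAIM (what is proved, stated in full; the proofs are below) =====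
def Claim_equal_flatten_skills_py : Prop := ∀ (skill_dict : List (String × List String)), Dom_flatten_skills_py skill_dict → Spec_flatten_skills_py skill_dict (flatten_skills_py skill_dict)

-- ===== LEMMAS AND PROOFS =====

-- A's dedup loop keeps both accumulators equal: it is folding Set.add in both components.
theorem pv_a_loop (xs : List String) (s : PySem.Set String) :
    xs.foldl
      (fun (st : PySem.Set String × List String) skill =>
        if ¬ PySem.Set.contains st.1 skill then (PySem.Set.add st.1 skill, st.2 ++ [skill]) else st)
      (s, s) = (xs.foldl PySem.Set.add s, xs.foldl PySem.Set.add s) := by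
  induction xs generalizing s with
  | nil => rfl
  | cons x t ih =>
    simp only [List.foldl_cons]
    by_cases h : x ∈ s
    · have hadd : PySem.Set.add s x = s := by simp [PySem.Set.add, h]
      rw [if_neg (by simp [h]), hadd]
      exact ih s
    · have hadd : PySem.Set.add s x = s ++ [x] := by simp [PySem.Set.add, h]
      rw [if_pos (by simp [h]), hadd]
      exact ih (s ++ [x])

-- adjacent-dedup with a "previous" element: the recursive form of B's loop
def pvAdj (p : String) : List String → List String
  | [] => []
  | x :: t => if x = p then pvAdj p t else x :: pvAdj x t

theorem pv_foldl_adj (xs : List String) : ∀ (acc : List String) (p : String),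
    acc.getLast? = some p →
    xs.foldl (fun out s => if out.getLast? ≠ some s then out ++ [s] else out) acc
      = acc ++ pvAdj p xs := by
  induction xs with
  | nil => intro acc p _; simp [pvAdj]
  | cons x t ih =>
    intro acc p h
    simp only [List.foldl_cons, pvAdj]
    by_cases hx : x = p
    · subst hx
      rw [if_neg (by simp [h]), if_pos rfl]
      exact ih acc x h
    · rw [if_pos (by rw [h]; simp [Ne.symm hx]), if_neg hx,
        ih (acc ++ [x]) x (by simp), List.append_assoc]
      simp
  
theorem pv_adj_good (xs : List String) : ∀ (p : String), (p :: xs).Pairwise (· ≤ ·) →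
    (p :: pvAdj p xs).Pairwise (· < ·) ∧ ∀ a, a ∈ p :: pvAdj p xs ↔ a ∈ p :: xs := by
  induction xs with
  | nil => intro p _; simp [pvAdj]
  | cons x t ih =>
    intro p h
    rcases List.pairwise_cons.mp h with ⟨hp, hxt⟩
    by_cases hx : x = p
    · subst hx
      obtain ⟨h1, h2⟩ := ih x hxt
      refine ⟨by simpa [pvAdj] using h1, fun a => ?_⟩
      have := h2 a
      simp only [pvAdj, if_pos]
      simp only [List.mem_cons] at this ⊢
      tauto
    · have hpx : p < x := lt_of_le_of_ne (hp x (by simp)) (Ne.symm hx)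
      obtain ⟨h1, h2⟩ := ih x hxt
      simp only [pvAdj, if_neg hx]
      constructor
      · refine List.pairwise_cons.mpr ⟨fun b hb => ?_, h1⟩
        rcases List.mem_cons.mp ((h2 b).mp hb) with rfl | hb'
        · exact hpx
        · exact lt_of_lt_of_le hpx ((List.pairwise_cons.mp hxt).1 b hb')
      · intro a
        have := h2 a
        simp only [List.mem_cons] at this ⊢
        tauto

-- ===== VERDICT (by name: the statement is the Claim_ definition above) =====
theorem flatten_skills_py_spec : Claim_equal_flatten_skills_py := by
  intro d _
  unfold Spec_flatten_skills_py flatten_skills_py flatten_skills_py_alt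
  rw [PySem.List.foldl_append_eq_flatMap]
  simp only [List.nil_append]
  set flat := d.flatMap (fun kv => kv.2) with hflat
  have hloop := pv_a_loop flat PySem.Set.empty
  simp only [PySem.Set.empty] at hloop ⊢
  rw [hloop]
  have hdedup : flat.foldl PySem.Set.add ([] : List String) = PySem.Set.ofList flat :=
    (PySem.Set.ofList_eq_foldl flat).symm
  rw [hdedup]
  rcases hs : PySem.List.sorted flat (fun x => x) false with _ | ⟨x, t⟩
  · have h0 : flat = [] := (PySem.List.sorted_eq_nil_iff flat (fun x => x) false).mp hs
    rw [h0]
    rfl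
  · have hpw : (x :: t).Pairwise (· ≤ ·) := by
      have := PySem.List.sorted_pairwise flat (fun y => y)
      rw [hs] at this; exact this
    have hfold : (x :: t).foldl (fun out s => if out.getLast? ≠ some s then out ++ [s] else out) []
        = x :: pvAdj x t := by
      simp only [List.foldl_cons]
      rw [if_pos (by simp)]
      simpa using pv_foldl_adj t [x] x (by simp)
    rw [hfold]
    obtain ⟨h1, h2⟩ := pv_adj_good t x hpw
    apply PySem.List.sorted_eq_of_perm_of_pairwise_lt
    · have hmemflat : ∀ a, a ∈ x :: t ↔ a ∈ flat := by
        intro a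
        rw [← hs]; exact PySem.List.mem_sorted flat (fun y => y) false a
      have hnd : (x :: pvAdj x t).Nodup := h1.imp ne_of_lt
      refine (List.perm_ext_iff_of_nodup hnd (PySem.Set.nodup_ofList flat)).mpr ?_
      intro a
      rw [h2 a, hmemflat a, PySem.Set.mem_ofList]
    · exact h1
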